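-- pv_equiv track=rewrite | github.com/SHIFU123457/GRP-B-ISP-JamesMagara | src/core/rag_pipeline.py | _is_obvious_chitchat
-- ===== SOURCE A (Python) =====
-- def _is_obvious_chitchat(query: str) -> bool:
--     """Check if query is obvious chitchat/greetings that should skip RAG entirely"""
--     query_lower = query.lower().strip()
--
--     # Only skip RAG for very obvious greetings and basic chitchat
--     chitchat_patterns = [
--         # Greetings
--         'hello', 'hi', 'hey', 'good morning', 'good afternoon', 'good evening',
--         'how are you', "what's up", 'whats up', 'sup',
--
--         # Basic questions about the bot
--         'who are you', 'what are you', 'your name',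
--
--         # Thank you / goodbye
--         'thank you', 'thanks', 'bye', 'goodbye', 'see you',
--     ]
--
--     # Check if query is just a greeting/chitchat
--     for pattern in chitchat_patterns:
--         if query_lower == pattern or query_lower.startswith(pattern + ' ') or query_lower.startswith(pattern + '?'):
--             return True
--
--     return False
-- ===== SOURCE B (Python) =====
-- _CHITCHAT = frozenset([
--     'hello', 'hi', 'hey', 'good morning', 'good afternoon', 'good evening',
--     'how are you', "what's up", 'whats up', 'sup',
--     'who are you', 'what are you', 'your name',
--     'thank you', 'thanks', 'bye', 'goodbye', 'see you',
-- ])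
--
--
-- def _is_obvious_chitchat(query: str) -> bool:
--     s = query.lower().strip()
--     # scan the query for boundary positions (end of string, or just before
--     # a space or '?') and test each boundary prefix against the pattern set
--     return any(s[:i] in _CHITCHAT
--                for i in range(len(s) + 1)
--                if i == len(s) or s[i] in ' ?')
-- ===== Notes on version B (the rewrite author's own statement) =====
-- stated objective: alternative
-- what changed: B inverts the traversal: instead of A's loop over the 18 patterns building two concatenated probe strings per pattern, B scans the normalized query once for boundary positions (string end, or a position holding a word-separator/question-mark character) and tests each boundary prefix for membership in a precomputed frozenset of the same patterns.
import Mathlib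
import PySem

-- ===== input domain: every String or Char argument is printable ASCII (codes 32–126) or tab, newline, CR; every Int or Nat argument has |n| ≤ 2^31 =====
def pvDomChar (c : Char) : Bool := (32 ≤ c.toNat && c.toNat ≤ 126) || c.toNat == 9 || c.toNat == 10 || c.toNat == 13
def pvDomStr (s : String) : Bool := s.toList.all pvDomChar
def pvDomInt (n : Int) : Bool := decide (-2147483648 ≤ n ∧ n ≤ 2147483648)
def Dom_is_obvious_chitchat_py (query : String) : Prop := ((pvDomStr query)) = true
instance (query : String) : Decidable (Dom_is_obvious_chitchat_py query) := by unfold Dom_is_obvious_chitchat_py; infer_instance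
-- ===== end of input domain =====

-- B replaces A's loop over the 18 patterns (with per-pattern equality and
-- prefix+' '/prefix+'?' tests) by one scan over the query's boundary positions,
-- testing each boundary prefix against a set of the same patterns (alternative).

-- ===== PORT A =====
def chitchatPatterns : List (List Char) :=
  ["hello".toList, "hi".toList, "hey".toList, "good morning".toList,
   "good afternoon".toList, "good evening".toList, "how are you".toList,
   "what's up".toList, "whats up".toList, "sup".toList,
   "who are you".toList, "what are you".toList, "your name".toList,
   "thank you".toList, "thanks".toList, "bye".toList, "goodbye".toList,
   "see you".toList]

def is_obvious_chitchat_py (query : String) : Bool :=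
  let ql := PySem.Chars.strip (PySem.Chars.lower query.toList)
  chitchatPatterns.any fun p =>
    ql == p || PySem.Chars.startswith ql (p ++ [' ']) || PySem.Chars.startswith ql (p ++ ['?'])

-- ===== PORT B =====
def chitchatSet : PySem.Set (List Char) := PySem.Set.ofList chitchatPatterns

def is_obvious_chitchat_py_alt (query : String) : Bool :=
  let s := PySem.Chars.strip (PySem.Chars.lower query.toList)
  (List.range (s.length + 1)).any fun i =>
    (i == s.length || s.getD i ' ' == ' ' || s.getD i ' ' == '?')
      && PySem.Set.contains chitchatSet (s.take i)

-- ===== PRECONDITION & SPEC =====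
def Spec_is_obvious_chitchat_py (query : String) (out : Bool) : Prop := out = is_obvious_chitchat_py_alt query
instance (query : String) (out : Bool) : Decidable (Spec_is_obvious_chitchat_py query out) := by unfold Spec_is_obvious_chitchat_py; infer_instance

-- ===== CLAIM (what is proved, stated in full; the proofs are below) =====
def Claim_equal_is_obvious_chitchat_py : Prop := ∀ (query : String), Dom_is_obvious_chitchat_py query → Spec_is_obvious_chitchat_py query (is_obvious_chitchat_py query)

-- ===== LEMMAS AND PROOFS =====

-- generic bridge: a pattern matches (equality / prefix+' ' / prefix+'?')
-- iff some boundary prefix of the query is in the pattern list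
theorem chitchat_key (pats : List (List Char)) (L : List Char) :
    (pats.any fun p =>
      L == p || PySem.Chars.startswith L (p ++ [' ']) || PySem.Chars.startswith L (p ++ ['?']))
    = ((List.range (L.length + 1)).any fun i =>
        (i == L.length || L.getD i ' ' == ' ' || L.getD i ' ' == '?')
          && PySem.Set.contains (PySem.Set.ofList pats) (L.take i)) := by
  rw [Bool.eq_iff_iff]
  simp only [List.any_eq_true, Bool.or_eq_true, Bool.and_eq_true, beq_iff_eq,
    PySem.Chars.startswith_iff, PySem.Set.contains_iff, PySem.Set.mem_ofList, List.mem_range]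
  constructor
  · rintro ⟨p, hp, (h | ⟨t, ht⟩) | ⟨t, ht⟩⟩
    · exact ⟨L.length, by omega, Or.inl (Or.inl rfl), by rw [List.take_length, h]; exact hp⟩
    · refine ⟨p.length, by subst ht; simp, Or.inl (Or.inr ?_), ?_⟩
      · subst ht
        rw [List.getD_eq_getElem?_getD]
        simp
      · subst ht
        rw [List.append_assoc, List.take_left]
        exact hp
    · refine ⟨p.length, by subst ht; simp, Or.inr ?_, ?_⟩
      · subst ht
        rw [List.getD_eq_getElem?_getD]
        simp
      · subst ht
        rw [List.append_assoc, List.take_left]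
        exact hp
  · rintro ⟨i, hi, hb, hm⟩
    by_cases he : i = L.length
    · exact ⟨L.take i, hm, Or.inl (Or.inl (by rw [he, List.take_length]))⟩
    · have hlt : i < L.length := by omega
      have hL : L = L.take i ++ L[i] :: L.drop (i + 1) := by
        conv_lhs => rw [← List.take_append_drop i L]
        rw [List.drop_eq_getElem_cons hlt]
      have hg : L.getD i ' ' = L[i] := List.getD_eq_getElem L ' ' hlt
      rcases hb with (h | h) | h
      · omega
      · refine ⟨L.take i, hm, Or.inl (Or.inr ⟨L.drop (i+1), ?_⟩)⟩
        rw [List.append_assoc, show (' ' : Char) = L[i] from by rw [← h, hg]]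
        exact hL.symm
      · refine ⟨L.take i, hm, Or.inr ⟨L.drop (i+1), ?_⟩⟩
        rw [List.append_assoc, show ('?' : Char) = L[i] from by rw [← h, hg]]
        exact hL.symm

-- ===== VERDICT (by name: the statement is the Claim_ definition above) =====
theorem is_obvious_chitchat_py_spec : Claim_equal_is_obvious_chitchat_py := by
  intro query _
  unfold Spec_is_obvious_chitchat_py is_obvious_chitchat_py is_obvious_chitchat_py_alt chitchatSet
  exact chitchat_key chitchatPatterns _
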